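-- pv_equiv track=rewrite | github.com/alu0101124896/Advent-of-Code | 2020/Day-16/main.py | validateTickets
-- ===== SOURCE A (Python) =====
-- def validateTickets(tickets: list, fieldRules: dict):
--   allTicketValues = [
--       ticketValue for ticket in tickets for ticketValue in ticket
--   ]
--
--   valueRanges = [
--       valueRange for ruleRanges in fieldRules.values()
--       for valueRange in ruleRanges.values()
--   ]
--
--   nonValidValues = [
--       ticketValue for ticketValue in allTicketValues
--       if not any([ticketValue in valueRange for valueRange in valueRanges])
--   ]
--
--   validTickets = [
--       ticket for ticket in tickets
--       if not any([value in ticket for value in nonValidValues])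
--   ]
--
--   return validTickets, nonValidValues
-- ===== SOURCE B (Python) =====
-- def validateTickets(tickets: list, fieldRules: dict):
--   valueRanges = [
--       valueRange for ruleRanges in fieldRules.values()
--       for valueRange in ruleRanges.values()
--   ]
--
--   validTickets = []
--   nonValidValues = []
--   for ticket in tickets:
--     hadInvalid = False
--     for value in ticket:
--       if not any(value in valueRange for valueRange in valueRanges):
--         nonValidValues.append(value)
--         hadInvalid = True
--     if not hadInvalid:
--       validTickets.append(ticket)
--
--   return validTickets, nonValidValues
-- ===== Notes on version B (the rewrite author's own statement) =====
-- stated objective: faster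
-- what changed: Replaces A's three list-comprehension passes (flatten all values, collect invalid ones, then re-scan every ticket against the whole invalid-value list) with a single loop over tickets that classifies each value once against the ranges, collecting invalid values and a per-ticket flag, so the quadratic tickets-times-invalid-values re-scan disappears.
import Mathlib
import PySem

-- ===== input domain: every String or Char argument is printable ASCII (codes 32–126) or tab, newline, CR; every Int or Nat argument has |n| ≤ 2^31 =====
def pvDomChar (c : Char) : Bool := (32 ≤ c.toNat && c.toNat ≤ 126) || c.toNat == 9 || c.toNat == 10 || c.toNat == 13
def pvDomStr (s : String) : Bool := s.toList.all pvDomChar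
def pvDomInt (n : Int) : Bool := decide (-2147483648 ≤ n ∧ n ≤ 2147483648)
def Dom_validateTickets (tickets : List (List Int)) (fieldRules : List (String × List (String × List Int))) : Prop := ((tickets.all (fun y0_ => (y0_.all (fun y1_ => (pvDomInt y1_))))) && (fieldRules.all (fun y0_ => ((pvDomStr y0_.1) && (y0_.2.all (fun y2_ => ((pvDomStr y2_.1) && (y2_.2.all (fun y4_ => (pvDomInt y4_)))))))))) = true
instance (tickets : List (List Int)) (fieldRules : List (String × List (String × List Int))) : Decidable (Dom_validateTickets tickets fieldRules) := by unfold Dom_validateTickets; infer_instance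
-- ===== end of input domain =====

-- B replaces A's three passes (flatten, filter invalid, re-scan every ticket against the whole
-- invalid-value list) by a single loop over tickets with a per-ticket invalid flag; faster
-- (no quadratic re-scan) and proved to return exactly A's value.

-- ===== PORT A =====
def validateTickets (tickets : List (List Int)) (fieldRules : List (String × List (String × List Int))) : List (List Int) × List Int :=
  let allTicketValues := tickets.flatMap (fun ticket => ticket)
  let valueRanges := (PySem.Dict.ofList fieldRules).values.flatMap
      (fun ruleRanges => (PySem.Dict.ofList ruleRanges).values)
  let nonValidValues := allTicketValues.filter
      (fun ticketValue => !(valueRanges.any (fun valueRange => valueRange.contains ticketValue)))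
  let validTickets := tickets.filter
      (fun ticket => !(nonValidValues.any (fun value => ticket.contains value)))
  (validTickets, nonValidValues)

-- ===== PORT B =====
def validateTickets_alt (tickets : List (List Int)) (fieldRules : List (String × List (String × List Int))) : List (List Int) × List Int :=
  let valueRanges := (PySem.Dict.ofList fieldRules).values.flatMap
      (fun ruleRanges => (PySem.Dict.ofList ruleRanges).values)
  tickets.foldl
    (fun (acc : List (List Int) × List Int) ticket =>
      let inner := ticket.foldl
        (fun (p : List Int × Bool) value =>
          if !(valueRanges.any (fun valueRange => valueRange.contains value)) then
            (p.1 ++ [value], true)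
          else p)
        (acc.2, false)
      (if inner.2 then acc.1 else acc.1 ++ [ticket], inner.1))
    ([], [])

-- ===== PRECONDITION & SPEC =====
def Spec_validateTickets (tickets : List (List Int)) (fieldRules : List (String × List (String × List Int))) (out : List (List Int) × List Int) : Prop := out = validateTickets_alt tickets fieldRules
instance (tickets : List (List Int)) (fieldRules : List (String × List (String × List Int))) (out : List (List Int) × List Int) : Decidable (Spec_validateTickets tickets fieldRules out) := by unfold Spec_validateTickets; infer_instance

-- ===== CLAIM (what is proved, stated in full; the proofs are below) =====
def Claim_equal_validateTickets : Prop := ∀ (tickets : List (List Int)) (fieldRules : List (String × List (String × List Int))), Dom_validateTickets tickets fieldRules → Spec_validateTickets tickets fieldRules (validateTickets tickets fieldRules)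

-- ===== LEMMAS AND PROOFS =====

-- B's inner fold over one ticket appends the bad values and ors the flag.
theorem pv_inner_fold (bad : Int → Bool) (t : List Int) (N : List Int) (b : Bool) :
    t.foldl (fun (p : List Int × Bool) v => if bad v then (p.1 ++ [v], true) else p) (N, b)
      = (N ++ t.filter bad, b || t.any bad) := by
  induction t generalizing N b with
  | nil => simp
  | cons v t ih =>
    by_cases h : bad v = true
    · simp [List.foldl_cons, h, ih]
    · simp only [Bool.not_eq_true] at h
      simp [List.foldl_cons, h, ih]

-- B's outer fold builds the filtered ticket list and the flattened bad values.
theorem pv_outer_fold (bad : Int → Bool) (ts : List (List Int)) (V : List (List Int)) (N : List Int) :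
    ts.foldl
      (fun (acc : List (List Int) × List Int) ticket =>
        let inner := ticket.foldl
          (fun (p : List Int × Bool) v => if bad v then (p.1 ++ [v], true) else p)
          (acc.2, false)
        (if inner.2 then acc.1 else acc.1 ++ [ticket], inner.1))
      (V, N)
      = (V ++ ts.filter (fun t => !(t.any bad)), N ++ ts.flatMap (fun t => t.filter bad)) := by
  induction ts generalizing V N with
  | nil => simp
  | cons t ts ih =>
    simp only [List.foldl_cons]
    rw [pv_inner_fold bad t N false]
    simp only [Bool.false_or]
    by_cases h : t.any bad = true
    · rw [if_pos h, ih, List.filter_cons, List.flatMap_cons]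
      simp [h]
    · rw [if_neg (by simp [h]), ih, List.filter_cons, List.flatMap_cons]
      simp [h]

-- filter distributes over flatMap
theorem pv_filter_flatMap (bad : Int → Bool) (ts : List (List Int)) :
    (ts.flatMap (fun t => t)).filter bad = ts.flatMap (fun t => t.filter bad) := by
  induction ts with
  | nil => rfl
  | cons t ts ih => rw [List.flatMap_cons, List.flatMap_cons, List.filter_append, ih]

-- A ticket contains some globally-invalid value iff it contains some value failing all ranges.
theorem pv_valid_pred (bad : Int → Bool) (ts : List (List Int)) (t : List Int) (ht : t ∈ ts) :
    ((ts.flatMap (fun t => t.filter bad)).any (fun v => t.contains v)) = t.any bad := by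
  by_cases h : t.any bad = true
  · rw [h]
    rw [List.any_eq_true] at h
    obtain ⟨v, hv, hb⟩ := h
    rw [List.any_eq_true]
    exact ⟨v, List.mem_flatMap.2 ⟨t, ht, List.mem_filter.2 ⟨hv, hb⟩⟩, by
      simpa [List.contains_iff_mem] using hv⟩
  · simp only [Bool.not_eq_true] at h
    rw [h, List.any_eq_false]
    intro w hw
    obtain ⟨t', _, hwf⟩ := List.mem_flatMap.1 hw
    obtain ⟨_, hbadw⟩ := List.mem_filter.1 hwf
    simp only [List.contains_iff_mem]
    intro hwt
    rw [List.any_eq_false] at h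
    exact absurd hbadw (by simp [h w hwt])

-- ===== VERDICT (by name: the statement is the Claim_ definition above) =====
theorem validateTickets_spec : Claim_equal_validateTickets := by
  intro tickets fieldRules _
  unfold Spec_validateTickets validateTickets validateTickets_alt
  set vr := (PySem.Dict.ofList fieldRules).values.flatMap
      (fun ruleRanges => (PySem.Dict.ofList ruleRanges).values) with hvr
  set bad : Int → Bool := fun v => !(vr.any (fun r => r.contains v)) with hbad
  rw [pv_outer_fold bad]
  simp only [List.nil_append]
  refine Prod.ext ?_ ?_
  · show (tickets.filter _) = _
    rw [pv_filter_flatMap bad]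
    exact List.filter_congr (fun t ht => by rw [pv_valid_pred bad tickets t ht])
  · exact pv_filter_flatMap bad tickets
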